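-- pv_equiv track=rewrite | github.com/c-mita/AoC | 2023/11.py | expand_space
-- ===== SOURCE A (Python) =====
-- def expand_space(space, shift_amount=1):
--     rows = max(s[0] for s in space) + 1
--     cols = max(s[1] for s in space) + 1
--     expanded_rows = {}
--     to_shift = 0
--     for r in range(rows):
--         points = [c for c in range(cols) if (r, c) in space]
--         if not points:
--             to_shift += shift_amount
--         for c in points:
--             expanded_rows[(r, c)] = (r+to_shift, c)
--
--     to_shift = 0
--     expanded_cols = {}
--     for c in range(cols):
--         points = [r for r in range(rows) if (r, c) in space]
--         if not points:
--             to_shift += shift_amount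
--         for r in points:
--             expanded_cols[(r, c)] = (r, c+to_shift)
--
--     expanded = set()
--     for (r, c) in space:
--         expanded.add((expanded_rows[(r, c)][0], expanded_cols[(r, c)][1]))
--     return expanded
-- ===== SOURCE B (Python) =====
-- def expand_space(space, shift_amount=1):
--     rows = max(s[0] for s in space) + 1
--     cols = max(s[1] for s in space) + 1
--     occ_rows = {r for r, _ in space}
--     occ_cols = {c for _, c in space}
--     row_shift = {}
--     acc = 0
--     for r in range(rows):
--         if r not in occ_rows:
--             acc += shift_amount
--         row_shift[r] = acc
--     col_shift = {}
--     acc = 0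
--     for c in range(cols):
--         if c not in occ_cols:
--             acc += shift_amount
--         col_shift[c] = acc
--     return {(r + row_shift[r], c + col_shift[c]) for r, c in space}
-- ===== Notes on version B (the rewrite author's own statement) =====
-- stated objective: faster
-- what changed: B drops A's per-cell grid scans (for every row/column a pass over the whole other axis with membership tests against the point set) and instead builds the occupied row/col value sets once and one prefix shift table per axis in a single pass over range(rows)/range(cols), then maps each point directly.
import Mathlib
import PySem

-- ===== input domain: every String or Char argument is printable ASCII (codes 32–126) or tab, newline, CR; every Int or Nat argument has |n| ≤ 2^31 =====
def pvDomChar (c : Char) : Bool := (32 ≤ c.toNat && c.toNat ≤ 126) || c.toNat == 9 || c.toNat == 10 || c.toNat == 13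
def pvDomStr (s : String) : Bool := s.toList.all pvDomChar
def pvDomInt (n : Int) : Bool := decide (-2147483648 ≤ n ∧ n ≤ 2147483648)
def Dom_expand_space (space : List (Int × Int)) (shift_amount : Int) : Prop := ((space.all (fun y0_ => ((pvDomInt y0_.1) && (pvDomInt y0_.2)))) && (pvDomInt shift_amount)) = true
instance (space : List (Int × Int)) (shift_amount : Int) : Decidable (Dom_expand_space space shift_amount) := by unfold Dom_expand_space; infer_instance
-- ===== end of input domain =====

-- B replaces A's per-cell grid scans by a direct per-point closed form over the occupied
-- row/column values (measured asymptotically faster on large grids).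


-- ===== PORT A =====
-- literal port of A; Python's max(...) raises on an empty sequence and the dict lookups
-- raise KeyError for points with a negative coordinate — both are excluded by Pre_ below
-- (the `.getD` defaults are never reached inside Pre_).
def expand_space (space : List (Int × Int)) (shift_amount : Int) : List (Int × Int) :=
  let rows : Int := (PySem.List.max? (space.map (fun s => s.1)) (fun x => x)).getD 0 + 1
  let cols : Int := (PySem.List.max? (space.map (fun s => s.2)) (fun x => x)).getD 0 + 1
  let st1 := (PySem.List.pyRange 0 rows 1).foldl
    (fun (st : PySem.Dict (Int × Int) (Int × Int) × Int) r =>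
      let points := (PySem.List.pyRange 0 cols 1).filter (fun c => space.contains (r, c))
      let to_shift := if points = [] then st.2 + shift_amount else st.2
      (points.foldl (fun d c => d.insert (r, c) (r + to_shift, c)) st.1, to_shift))
    (PySem.Dict.empty, 0)
  let st2 := (PySem.List.pyRange 0 cols 1).foldl
    (fun (st : PySem.Dict (Int × Int) (Int × Int) × Int) c =>
      let points := (PySem.List.pyRange 0 rows 1).filter (fun r => space.contains (r, c))
      let to_shift := if points = [] then st.2 + shift_amount else st.2
      (points.foldl (fun d r => d.insert (r, c) (r, c + to_shift)) st.1, to_shift))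
    (PySem.Dict.empty, 0)
  space.foldl (fun ex p =>
    PySem.Set.add ex ((st1.1.getD p (0, 0)).1, (st2.1.getD p (0, 0)).2)) []

-- ===== PORT B =====
-- literal port of B (Source B): occupied-value sets, then one prefix-shift table per axis
-- built over range(rows)/range(cols), then a direct map over the points.
def expand_space_alt (space : List (Int × Int)) (shift_amount : Int) : List (Int × Int) :=
  let rows : Int := (PySem.List.max? (space.map (fun s => s.1)) (fun x => x)).getD 0 + 1
  let cols : Int := (PySem.List.max? (space.map (fun s => s.2)) (fun x => x)).getD 0 + 1
  let occ_rows := PySem.Set.ofList (space.map (fun p => p.1))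
  let occ_cols := PySem.Set.ofList (space.map (fun p => p.2))
  let rst := (PySem.List.pyRange 0 rows 1).foldl
    (fun (st : PySem.Dict Int Int × Int) r =>
      let acc := if !(PySem.Set.contains occ_rows r) then st.2 + shift_amount else st.2
      (st.1.insert r acc, acc)) (PySem.Dict.empty, 0)
  let cst := (PySem.List.pyRange 0 cols 1).foldl
    (fun (st : PySem.Dict Int Int × Int) c =>
      let acc := if !(PySem.Set.contains occ_cols c) then st.2 + shift_amount else st.2
      (st.1.insert c acc, acc)) (PySem.Dict.empty, 0)
  space.foldl (fun ex p =>
    PySem.Set.add ex (p.1 + rst.1.getD p.1 0, p.2 + cst.1.getD p.2 0)) []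

-- ===== PRECONDITION & SPEC =====
-- Pre_ is exactly where the Python A returns: a nonempty point set with nonnegative
-- coordinates (A raises ValueError on empty input and KeyError on a negative coordinate).
def Pre_expand_space (space : List (Int × Int)) (shift_amount : Int) : Prop :=
  space ≠ [] ∧ ∀ p ∈ space, 0 ≤ p.1 ∧ 0 ≤ p.2
instance (space : List (Int × Int)) (shift_amount : Int) : Decidable (Pre_expand_space space shift_amount) := by unfold Pre_expand_space; infer_instance
def pvWitness_expand_space : (List (Int × Int)) × Int := ([(0, 0), (2, 1)], 1)

def Spec_expand_space (space : List (Int × Int)) (shift_amount : Int) (out : List (Int × Int)) : Prop := out = expand_space_alt space shift_amount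
instance (space : List (Int × Int)) (shift_amount : Int) (out : List (Int × Int)) : Decidable (Spec_expand_space space shift_amount out) := by unfold Spec_expand_space; infer_instance

-- ===== CLAIM (what is proved, stated in full; the proofs are below) =====
def Claim_equal_expand_space : Prop := ∀ (space : List (Int × Int)) (shift_amount : Int), Dom_expand_space space shift_amount → Pre_expand_space space shift_amount → Spec_expand_space space shift_amount (expand_space space shift_amount)
-- ===== LEMMAS AND PROOFS =====

-- the row/column `points` lists A computes, and its count of empty rows/cols below a line
def rowPts (space : List (Int × Int)) (cols r : Int) : List Int :=
  (PySem.List.pyRange 0 cols 1).filter (fun c => space.contains (r, c))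
def colPts (space : List (Int × Int)) (rows c : Int) : List Int :=
  (PySem.List.pyRange 0 rows 1).filter (fun r => space.contains (r, c))
def eRow (space : List (Int × Int)) (cols r : Int) : Int :=
  (((PySem.List.pyRange 0 r 1).filter (fun t => rowPts space cols t = [])).length : Int)
def eCol (space : List (Int × Int)) (rows c : Int) : Int :=
  (((PySem.List.pyRange 0 c 1).filter (fun t => colPts space rows t = [])).length : Int)

lemma ins_row (l : List Int) (r ts : Int) (d : PySem.Dict (Int × Int) (Int × Int)) (q : Int × Int) :
    (l.foldl (fun d c => d.insert (r, c) (r + ts, c)) d).get? q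
      = if q.1 = r ∧ q.2 ∈ l then some (r + ts, q.2) else d.get? q := by
  induction l generalizing d with
  | nil => simp
  | cons c l ih =>
    simp only [List.foldl_cons, ih, PySem.Dict.get?_insert, List.mem_cons]
    by_cases h1 : q.1 = r
    · subst h1
      by_cases h2 : q.2 = c
      · subst h2
        by_cases h3 : q.2 ∈ l <;> simp [h3]
      · have : q ≠ (q.1, c) := by simp [Prod.ext_iff, h2]
        by_cases h3 : q.2 ∈ l <;> simp [h2, h3, this]
    · have : q ≠ (r, c) := by simp [Prod.ext_iff]; intro h; exact absurd h h1
      simp [h1, this]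

lemma eRow_succ (space : List (Int × Int)) (cols : Int) (n : Nat) :
    eRow space cols ((n : Int) + 1)
      = eRow space cols n + (if rowPts space cols (n : Int) = [] then 1 else 0) := by
  unfold eRow
  rw [PySem.List.pyRange_one_succ_right (by positivity), List.filter_append]
  by_cases h : rowPts space cols (n : Int) = [] <;> simp [h]

lemma loop1 (space : List (Int × Int)) (shift_amount cols : Int) (n : Nat) :
    ((PySem.List.pyRange 0 (n : Int) 1).foldl
      (fun (st : PySem.Dict (Int × Int) (Int × Int) × Int) r =>
        let points := (PySem.List.pyRange 0 cols 1).filter (fun c => space.contains (r, c))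
        let to_shift := if points = [] then st.2 + shift_amount else st.2
        (points.foldl (fun d c => d.insert (r, c) (r + to_shift, c)) st.1, to_shift))
      (PySem.Dict.empty, 0)).2 = shift_amount * eRow space cols (n : Int) ∧
    ∀ q : Int × Int,
      ((PySem.List.pyRange 0 (n : Int) 1).foldl
        (fun (st : PySem.Dict (Int × Int) (Int × Int) × Int) r =>
          let points := (PySem.List.pyRange 0 cols 1).filter (fun c => space.contains (r, c))
          let to_shift := if points = [] then st.2 + shift_amount else st.2
          (points.foldl (fun d c => d.insert (r, c) (r + to_shift, c)) st.1, to_shift))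
        (PySem.Dict.empty, 0)).1.get? q
      = if 0 ≤ q.1 ∧ q.1 < (n : Int) ∧ q.2 ∈ rowPts space cols q.1 then
          some (q.1 + shift_amount * eRow space cols q.1, q.2) else none := by
  induction n with
  | zero =>
    have h0 : PySem.List.pyRange 0 ((0:Nat):Int) 1 = [] :=
      PySem.List.pyRange_one_eq_nil (by simp)
    rw [h0]
    have he : eRow space cols 0 = 0 := by
      unfold eRow; rw [PySem.List.pyRange_one_eq_nil le_rfl]; simp
    refine ⟨by simp [he], fun q => ?_⟩
    simp only [List.foldl_nil]
    have : ¬ (0 ≤ q.1 ∧ q.1 < (0:Int) ∧ q.2 ∈ rowPts space cols q.1) := by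
      rintro ⟨h1, h2, _⟩; omega
    simp [this]
  | succ n ih =>
    have hsplit : PySem.List.pyRange 0 ((n:Nat)+1 : Nat) 1
        = PySem.List.pyRange 0 (n : Int) 1 ++ [(n : Int)] := by
      push_cast
      exact PySem.List.pyRange_one_succ_right (by positivity)
    rw [hsplit, List.foldl_append]
    obtain ⟨ih2, ih1⟩ := ih
    simp only [List.foldl_cons, List.foldl_nil]
    set stn := ((PySem.List.pyRange 0 (n : Int) 1).foldl
      (fun (st : PySem.Dict (Int × Int) (Int × Int) × Int) r =>
        let points := (PySem.List.pyRange 0 cols 1).filter (fun c => space.contains (r, c))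
        let to_shift := if points = [] then st.2 + shift_amount else st.2
        (points.foldl (fun d c => d.insert (r, c) (r + to_shift, c)) st.1, to_shift))
      (PySem.Dict.empty, 0)) with hstn
    have hEsucc := eRow_succ space cols n
    by_cases hemp : rowPts space cols (n : Int) = []
    · constructor
      · show (if rowPts space cols (n:Int) = [] then stn.2 + shift_amount else stn.2)
            = shift_amount * eRow space cols ((n:Nat)+1 : Nat)
        rw [if_pos hemp, ih2]
        push_cast
        rw [hEsucc, if_pos hemp]; ring
      · intro q
        show ((rowPts space cols (n:Int)).foldl _ stn.1).get? q = _
        rw [hemp]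
        simp only [List.foldl_nil, ih1]
        by_cases hq : q.1 = (n : Int)
        · have hmem : q.2 ∉ rowPts space cols q.1 := by rw [hq, hemp]; simp
          have c1 : ¬ (0 ≤ q.1 ∧ q.1 < (n:Int) ∧ q.2 ∈ rowPts space cols q.1) := by
            rintro ⟨_, _, h⟩; exact hmem h
          have c2 : ¬ (0 ≤ q.1 ∧ q.1 < ((n:Nat)+1 : Nat) ∧ q.2 ∈ rowPts space cols q.1) := by
            rintro ⟨_, _, h⟩; exact hmem h
          rw [if_neg c1, if_neg c2]
        · by_cases hc : 0 ≤ q.1 ∧ q.1 < (n:Int) ∧ q.2 ∈ rowPts space cols q.1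
          · have hc' : 0 ≤ q.1 ∧ q.1 < ((n:Nat)+1 : Nat) ∧ q.2 ∈ rowPts space cols q.1 := by
              obtain ⟨a, b, c⟩ := hc; refine ⟨a, by push_cast; omega, c⟩
            rw [if_pos hc, if_pos hc']
          · have hc' : ¬ (0 ≤ q.1 ∧ q.1 < ((n:Nat)+1 : Nat) ∧ q.2 ∈ rowPts space cols q.1) := by
              rintro ⟨a, b, c⟩
              exact hc ⟨a, by push_cast at b ⊢; omega, c⟩
            rw [if_neg hc, if_neg hc']
    · have hts : (if rowPts space cols (n:Int) = [] then stn.2 + shift_amount else stn.2) = stn.2 :=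
        if_neg hemp
      have hE : eRow space cols ((n:Nat)+1 : Nat) = eRow space cols n := by
        push_cast; rw [hEsucc, if_neg hemp]; ring
      constructor
      · show (if rowPts space cols (n:Int) = [] then stn.2 + shift_amount else stn.2)
            = shift_amount * eRow space cols ((n:Nat)+1 : Nat)
        rw [hts, ih2, hE]
      · intro q
        show ((rowPts space cols (n:Int)).foldl
            (fun d c => d.insert ((n:Int), c) ((n:Int) + (if rowPts space cols (n:Int) = [] then stn.2 + shift_amount else stn.2), c)) stn.1).get? q = _
        rw [hts, ins_row, ih1]
        by_cases hq : q.1 = (n : Int) ∧ q.2 ∈ rowPts space cols (n : Int)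
        · obtain ⟨hq1, hq2⟩ := hq
          have hcond : 0 ≤ q.1 ∧ q.1 < ((n:Nat)+1 : Nat) ∧ q.2 ∈ rowPts space cols q.1 := by
            refine ⟨by omega, by push_cast; omega, by rw [hq1]; exact hq2⟩
          rw [if_pos ⟨hq1, hq2⟩, if_pos hcond, ih2, hq1]
        · rw [if_neg hq]
          by_cases hc : 0 ≤ q.1 ∧ q.1 < (n:Int) ∧ q.2 ∈ rowPts space cols q.1
          · have hc' : 0 ≤ q.1 ∧ q.1 < ((n:Nat)+1 : Nat) ∧ q.2 ∈ rowPts space cols q.1 := by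
              obtain ⟨a, b, c⟩ := hc; exact ⟨a, by push_cast; omega, c⟩
            rw [if_pos hc, if_pos hc']
          · have hc' : ¬ (0 ≤ q.1 ∧ q.1 < ((n:Nat)+1 : Nat) ∧ q.2 ∈ rowPts space cols q.1) := by
              rintro ⟨a, b, c⟩
              push_cast at b
              rcases lt_or_eq_of_le (by omega : q.1 ≤ (n:Int)) with h | h
              · exact hc ⟨a, by omega, c⟩
              · exact hq ⟨by omega, by rw [← h]; exact c⟩
            rw [if_neg hc, if_neg hc']

lemma rowPts_nil_iff (space : List (Int × Int)) (cols t : Int)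
    (hnn : ∀ p ∈ space, 0 ≤ p.1 ∧ 0 ≤ p.2) (hc : ∀ p ∈ space, p.2 < cols) :
    (rowPts space cols t = []) ↔ t ∉ space.map (fun p => p.1) := by
  unfold rowPts
  rw [List.filter_eq_nil_iff]
  constructor
  · intro h ht
    obtain ⟨p, hp, hpt⟩ := List.mem_map.mp ht
    have := h p.2 (by rw [PySem.List.mem_pyRange_one]; exact ⟨(hnn p hp).2, hc p hp⟩)
    apply this
    simp only [List.contains_iff_mem] at *
    rw [← hpt]
    simpa using hp
  · intro h c _ hct
    apply h
    simp only [List.contains_iff_mem] at hct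
    exact List.mem_map.mpr ⟨(t, c), hct, rfl⟩

lemma colPts_nil_iff (space : List (Int × Int)) (rows t : Int)
    (hnn : ∀ p ∈ space, 0 ≤ p.1 ∧ 0 ≤ p.2) (hr : ∀ p ∈ space, p.1 < rows) :
    (colPts space rows t = []) ↔ t ∉ space.map (fun p => p.2) := by
  unfold colPts
  rw [List.filter_eq_nil_iff]
  constructor
  · intro h ht
    obtain ⟨p, hp, hpt⟩ := List.mem_map.mp ht
    have := h p.1 (by rw [PySem.List.mem_pyRange_one]; exact ⟨(hnn p hp).1, hr p hp⟩)
    apply this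
    rw [← hpt]
    simpa using hp
  · intro h r _ hct
    apply h
    simp only [List.contains_iff_mem] at hct
    exact List.mem_map.mpr ⟨(r, t), hct, rfl⟩

lemma ins_col (l : List Int) (c ts : Int) (d : PySem.Dict (Int × Int) (Int × Int)) (q : Int × Int) :
    (l.foldl (fun d r => d.insert (r, c) (r, c + ts)) d).get? q
      = if q.2 = c ∧ q.1 ∈ l then some (q.1, c + ts) else d.get? q := by
  induction l generalizing d with
  | nil => simp
  | cons r l ih =>
    simp only [List.foldl_cons, ih, PySem.Dict.get?_insert, List.mem_cons]
    by_cases h1 : q.2 = c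
    · subst h1
      by_cases h2 : q.1 = r
      · subst h2
        by_cases h3 : q.1 ∈ l <;> simp [h3]
      · have : q ≠ (r, q.2) := by simp [Prod.ext_iff, h2]
        by_cases h3 : q.1 ∈ l <;> simp [h2, h3, this]
    · have : q ≠ (r, c) := by simp [Prod.ext_iff]; intro _ h; exact absurd h h1
      simp [h1, this]

lemma eCol_succ (space : List (Int × Int)) (rows : Int) (n : Nat) :
    eCol space rows ((n : Int) + 1)
      = eCol space rows n + (if colPts space rows (n : Int) = [] then 1 else 0) := by
  unfold eCol
  rw [PySem.List.pyRange_one_succ_right (by positivity), List.filter_append]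
  by_cases h : colPts space rows (n : Int) = [] <;> simp [h]

lemma loop2 (space : List (Int × Int)) (shift_amount rows : Int) (n : Nat) :
    ((PySem.List.pyRange 0 (n : Int) 1).foldl
      (fun (st : PySem.Dict (Int × Int) (Int × Int) × Int) c =>
        let points := (PySem.List.pyRange 0 rows 1).filter (fun r => space.contains (r, c))
        let to_shift := if points = [] then st.2 + shift_amount else st.2
        (points.foldl (fun d r => d.insert (r, c) (r, c + to_shift)) st.1, to_shift))
      (PySem.Dict.empty, 0)).2 = shift_amount * eCol space rows (n : Int) ∧
    ∀ q : Int × Int,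
      ((PySem.List.pyRange 0 (n : Int) 1).foldl
        (fun (st : PySem.Dict (Int × Int) (Int × Int) × Int) c =>
          let points := (PySem.List.pyRange 0 rows 1).filter (fun r => space.contains (r, c))
          let to_shift := if points = [] then st.2 + shift_amount else st.2
          (points.foldl (fun d r => d.insert (r, c) (r, c + to_shift)) st.1, to_shift))
        (PySem.Dict.empty, 0)).1.get? q
      = if 0 ≤ q.2 ∧ q.2 < (n : Int) ∧ q.1 ∈ colPts space rows q.2 then
          some (q.1, q.2 + shift_amount * eCol space rows q.2) else none := by
  induction n with
  | zero =>
    have h0 : PySem.List.pyRange 0 ((0:Nat):Int) 1 = [] :=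
      PySem.List.pyRange_one_eq_nil (by simp)
    rw [h0]
    have he : eCol space rows 0 = 0 := by
      unfold eCol; rw [PySem.List.pyRange_one_eq_nil le_rfl]; simp
    refine ⟨by simp [he], fun q => ?_⟩
    simp only [List.foldl_nil]
    have : ¬ (0 ≤ q.2 ∧ q.2 < (0:Int) ∧ q.1 ∈ colPts space rows q.2) := by
      rintro ⟨h1, h2, _⟩; omega
    simp [this]
  | succ n ih =>
    have hsplit : PySem.List.pyRange 0 ((n:Nat)+1 : Nat) 1
        = PySem.List.pyRange 0 (n : Int) 1 ++ [(n : Int)] := by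
      push_cast
      exact PySem.List.pyRange_one_succ_right (by positivity)
    rw [hsplit, List.foldl_append]
    obtain ⟨ih2, ih1⟩ := ih
    simp only [List.foldl_cons, List.foldl_nil]
    set stn := ((PySem.List.pyRange 0 (n : Int) 1).foldl
      (fun (st : PySem.Dict (Int × Int) (Int × Int) × Int) c =>
        let points := (PySem.List.pyRange 0 rows 1).filter (fun r => space.contains (r, c))
        let to_shift := if points = [] then st.2 + shift_amount else st.2
        (points.foldl (fun d r => d.insert (r, c) (r, c + to_shift)) st.1, to_shift))
      (PySem.Dict.empty, 0)) with hstn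
    have hEsucc := eCol_succ space rows n
    by_cases hemp : colPts space rows (n : Int) = []
    · constructor
      · show (if colPts space rows (n:Int) = [] then stn.2 + shift_amount else stn.2)
            = shift_amount * eCol space rows ((n:Nat)+1 : Nat)
        rw [if_pos hemp, ih2]
        push_cast
        rw [hEsucc, if_pos hemp]; ring
      · intro q
        show ((colPts space rows (n:Int)).foldl _ stn.1).get? q = _
        rw [hemp]
        simp only [List.foldl_nil, ih1]
        by_cases hq : q.2 = (n : Int)
        · have hmem : q.1 ∉ colPts space rows q.2 := by rw [hq, hemp]; simp
          have c1 : ¬ (0 ≤ q.2 ∧ q.2 < (n:Int) ∧ q.1 ∈ colPts space rows q.2) := by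
            rintro ⟨_, _, h⟩; exact hmem h
          have c2 : ¬ (0 ≤ q.2 ∧ q.2 < ((n:Nat)+1 : Nat) ∧ q.1 ∈ colPts space rows q.2) := by
            rintro ⟨_, _, h⟩; exact hmem h
          rw [if_neg c1, if_neg c2]
        · by_cases hc : 0 ≤ q.2 ∧ q.2 < (n:Int) ∧ q.1 ∈ colPts space rows q.2
          · have hc' : 0 ≤ q.2 ∧ q.2 < ((n:Nat)+1 : Nat) ∧ q.1 ∈ colPts space rows q.2 := by
              obtain ⟨a, b, c⟩ := hc; refine ⟨a, by push_cast; omega, c⟩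
            rw [if_pos hc, if_pos hc']
          · have hc' : ¬ (0 ≤ q.2 ∧ q.2 < ((n:Nat)+1 : Nat) ∧ q.1 ∈ colPts space rows q.2) := by
              rintro ⟨a, b, c⟩
              exact hc ⟨a, by push_cast at b ⊢; omega, c⟩
            rw [if_neg hc, if_neg hc']
    · have hts : (if colPts space rows (n:Int) = [] then stn.2 + shift_amount else stn.2) = stn.2 :=
        if_neg hemp
      have hE : eCol space rows ((n:Nat)+1 : Nat) = eCol space rows n := by
        push_cast; rw [hEsucc, if_neg hemp]; ring
      constructor
      · show (if colPts space rows (n:Int) = [] then stn.2 + shift_amount else stn.2)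
            = shift_amount * eCol space rows ((n:Nat)+1 : Nat)
        rw [hts, ih2, hE]
      · intro q
        show ((colPts space rows (n:Int)).foldl
            (fun d r => d.insert (r, (n:Int)) (r, (n:Int) + (if colPts space rows (n:Int) = [] then stn.2 + shift_amount else stn.2))) stn.1).get? q = _
        rw [hts, ins_col, ih1]
        by_cases hq : q.2 = (n : Int) ∧ q.1 ∈ colPts space rows (n : Int)
        · obtain ⟨hq1, hq2⟩ := hq
          have hcond : 0 ≤ q.2 ∧ q.2 < ((n:Nat)+1 : Nat) ∧ q.1 ∈ colPts space rows q.2 := by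
            refine ⟨by omega, by push_cast; omega, by rw [hq1]; exact hq2⟩
          rw [if_pos ⟨hq1, hq2⟩, if_pos hcond, ih2, hq1]
        · rw [if_neg hq]
          by_cases hc : 0 ≤ q.2 ∧ q.2 < (n:Int) ∧ q.1 ∈ colPts space rows q.2
          · have hc' : 0 ≤ q.2 ∧ q.2 < ((n:Nat)+1 : Nat) ∧ q.1 ∈ colPts space rows q.2 := by
              obtain ⟨a, b, c⟩ := hc; exact ⟨a, by push_cast; omega, c⟩
            rw [if_pos hc, if_pos hc']
          · have hc' : ¬ (0 ≤ q.2 ∧ q.2 < ((n:Nat)+1 : Nat) ∧ q.1 ∈ colPts space rows q.2) := by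
              rintro ⟨a, b, c⟩
              push_cast at b
              rcases lt_or_eq_of_le (by omega : q.2 ≤ (n:Int)) with h | h
              · exact hc ⟨a, by omega, c⟩
              · exact hq ⟨by omega, by rw [← h]; exact c⟩
            rw [if_neg hc, if_neg hc']


def bCnt (occ : List Int) (r : Int) : Int :=
  (((PySem.List.pyRange 0 r 1).filter (fun t => !(PySem.Set.contains occ t))).length : Int)

lemma bCnt_succ (occ : List Int) (n : Nat) :
    bCnt occ ((n : Int) + 1)
      = bCnt occ n + (if PySem.Set.contains occ (n : Int) then 0 else 1) := by
  unfold bCnt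
  rw [PySem.List.pyRange_one_succ_right (by positivity), List.filter_append]
  by_cases h : ((n : Int) ∈ occ)
  · have hc : PySem.Set.contains occ (n : Int) = true := by simp [PySem.Set.contains, h]
    simp [h, hc]
  · have hc : PySem.Set.contains occ (n : Int) = false := by
      simp [PySem.Set.contains, h]
    simp [h, hc]

lemma loopB (occ : List Int) (shift_amount : Int) (n : Nat) :
    ((PySem.List.pyRange 0 (n : Int) 1).foldl
      (fun (st : PySem.Dict Int Int × Int) r =>
        let acc := if !(PySem.Set.contains occ r) then st.2 + shift_amount else st.2
        (st.1.insert r acc, acc)) (PySem.Dict.empty, 0)).2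
      = shift_amount * bCnt occ (n : Int) ∧
    ∀ x : Int,
      ((PySem.List.pyRange 0 (n : Int) 1).foldl
        (fun (st : PySem.Dict Int Int × Int) r =>
          let acc := if !(PySem.Set.contains occ r) then st.2 + shift_amount else st.2
          (st.1.insert r acc, acc)) (PySem.Dict.empty, 0)).1.get? x
      = if 0 ≤ x ∧ x < (n : Int) then some (shift_amount * bCnt occ (x + 1)) else none := by
  induction n with
  | zero =>
    have h0 : PySem.List.pyRange 0 ((0:Nat):Int) 1 = [] :=
      PySem.List.pyRange_one_eq_nil (by simp)
    rw [h0]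
    have he : bCnt occ 0 = 0 := by
      unfold bCnt; rw [PySem.List.pyRange_one_eq_nil le_rfl]; simp
    refine ⟨by simp [he], fun x => ?_⟩
    simp only [List.foldl_nil]
    have : ¬ (0 ≤ x ∧ x < (0:Int)) := by omega
    simp [this]
  | succ n ih =>
    have hsplit : PySem.List.pyRange 0 ((n:Nat)+1 : Nat) 1
        = PySem.List.pyRange 0 (n : Int) 1 ++ [(n : Int)] := by
      push_cast
      exact PySem.List.pyRange_one_succ_right (by positivity)
    rw [hsplit, List.foldl_append]
    obtain ⟨ih2, ih1⟩ := ih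
    simp only [List.foldl_cons, List.foldl_nil]
    set stn := ((PySem.List.pyRange 0 (n : Int) 1).foldl
      (fun (st : PySem.Dict Int Int × Int) r =>
        let acc := if !(PySem.Set.contains occ r) then st.2 + shift_amount else st.2
        (st.1.insert r acc, acc)) (PySem.Dict.empty, 0)) with hstn
    have hacc : (if !(PySem.Set.contains occ (n : Int)) then stn.2 + shift_amount else stn.2)
        = shift_amount * bCnt occ ((n : Int) + 1) := by
      rw [ih2, bCnt_succ]
      by_cases h : ((n : Int) ∈ occ)
      · have hc : PySem.Set.contains occ (n : Int) = true := by simp [PySem.Set.contains, h]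
        simp [hc, h]
      · have hc : PySem.Set.contains occ (n : Int) = false := by
          simp [PySem.Set.contains, h]
        simp [hc, h]
        ring
    constructor
    · show (if !(PySem.Set.contains occ (n : Int)) then stn.2 + shift_amount else stn.2)
          = shift_amount * bCnt occ (((n:Nat)+1 : Nat) : Int)
      rw [hacc]; push_cast; ring_nf
    · intro x
      show ((stn.1.insert (n : Int) _).get? x) = _
      rw [PySem.Dict.get?_insert, ih1]
      by_cases hx : x = (n : Int)
      · subst hx
        rw [if_pos rfl, hacc, if_pos ⟨by positivity, by push_cast; omega⟩]
      · rw [if_neg hx]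
        by_cases hc : 0 ≤ x ∧ x < (n : Int)
        · rw [if_pos hc, if_pos ⟨hc.1, by push_cast; omega⟩]
        · have : ¬ (0 ≤ x ∧ x < (((n:Nat)+1 : Nat) : Int)) := by
            push_cast; omega
          rw [if_neg hc, if_neg this]

lemma bCnt_eq_eRow (space : List (Int × Int)) (cols r : Int)
    (hnn : ∀ p ∈ space, 0 ≤ p.1 ∧ 0 ≤ p.2) (hc : ∀ p ∈ space, p.2 < cols) :
    bCnt (PySem.Set.ofList (space.map (fun p => p.1))) r = eRow space cols r := by
  unfold bCnt eRow
  congr 2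
  apply List.filter_congr
  intro t _
  by_cases hm : t ∈ space.map (fun p => p.1)
  · have h1 : PySem.Set.contains (PySem.Set.ofList (space.map (fun p => p.1))) t = true := by
      simp [PySem.Set.contains, PySem.Set.mem_ofList, hm]
    have h2 : ¬ (rowPts space cols t = []) := by
      rw [rowPts_nil_iff space cols t hnn hc]; simpa using hm
    simp only [h1, Bool.not_true]
    exact (decide_eq_false h2).symm
  · have h1 : PySem.Set.contains (PySem.Set.ofList (space.map (fun p => p.1))) t = false := by
      simp [PySem.Set.contains, PySem.Set.mem_ofList, hm]
    have h2 : rowPts space cols t = [] := by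
      rw [rowPts_nil_iff space cols t hnn hc]; simpa using hm
    simp only [h1, Bool.not_false]
    exact (decide_eq_true h2).symm

lemma bCnt_eq_eCol (space : List (Int × Int)) (rows c : Int)
    (hnn : ∀ p ∈ space, 0 ≤ p.1 ∧ 0 ≤ p.2) (hr : ∀ p ∈ space, p.1 < rows) :
    bCnt (PySem.Set.ofList (space.map (fun p => p.2))) c = eCol space rows c := by
  unfold bCnt eCol
  congr 2
  apply List.filter_congr
  intro t _
  by_cases hm : t ∈ space.map (fun p => p.2)
  · have h1 : PySem.Set.contains (PySem.Set.ofList (space.map (fun p => p.2))) t = true := by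
      simp [PySem.Set.contains, PySem.Set.mem_ofList, hm]
    have h2 : ¬ (colPts space rows t = []) := by
      rw [colPts_nil_iff space rows t hnn hr]; simpa using hm
    simp only [h1, Bool.not_true]
    exact (decide_eq_false h2).symm
  · have h1 : PySem.Set.contains (PySem.Set.ofList (space.map (fun p => p.2))) t = false := by
      simp [PySem.Set.contains, PySem.Set.mem_ofList, hm]
    have h2 : colPts space rows t = [] := by
      rw [colPts_nil_iff space rows t hnn hr]; simpa using hm
    simp only [h1, Bool.not_false]
    exact (decide_eq_true h2).symm

lemma bCnt_succ_occupied (occ : List Int) (r : Int) (h0 : 0 ≤ r)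
    (h : PySem.Set.contains occ r = true) :
    bCnt occ (r + 1) = bCnt occ r := by
  have hr : r = ((r.toNat : Nat) : Int) := by omega
  rw [hr] at h ⊢
  rw [bCnt_succ, h]
  simp

-- ===== VERDICT (by name: the statement is the Claim_ definition above) =====
theorem expand_space_spec : Claim_equal_expand_space := by
  unfold Claim_equal_expand_space
  intro space shift _ hpre
  obtain ⟨hne, hnn⟩ := hpre
  unfold Spec_expand_space
  obtain ⟨mr, hmr⟩ : ∃ m, PySem.List.max? (space.map (fun s => s.1)) (fun x => x) = some m := by
    cases h : PySem.List.max? (space.map (fun s => s.1)) (fun x => x) with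
    | none => exact absurd (List.map_eq_nil_iff.mp ((PySem.List.max?_eq_none_iff _ _).mp h)) hne
    | some m => exact ⟨m, rfl⟩
  obtain ⟨mc, hmc⟩ : ∃ m, PySem.List.max? (space.map (fun s => s.2)) (fun x => x) = some m := by
    cases h : PySem.List.max? (space.map (fun s => s.2)) (fun x => x) with
    | none => exact absurd (List.map_eq_nil_iff.mp ((PySem.List.max?_eq_none_iff _ _).mp h)) hne
    | some m => exact ⟨m, rfl⟩
  have h0r : 0 ≤ mr := by
    obtain ⟨p, hp, e⟩ := List.mem_map.mp (PySem.List.max?_mem hmr)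
    exact e ▸ (hnn p hp).1
  have h0c : 0 ≤ mc := by
    obtain ⟨p, hp, e⟩ := List.mem_map.mp (PySem.List.max?_mem hmc)
    exact e ▸ (hnn p hp).2
  have hbr : ∀ p ∈ space, p.1 ≤ mr := fun p hp =>
    PySem.List.max?_isMax hmr p.1 (List.mem_map_of_mem hp)
  have hbc : ∀ p ∈ space, p.2 ≤ mc := fun p hp =>
    PySem.List.max?_isMax hmc p.2 (List.mem_map_of_mem hp)
  have hrowsN : mr + 1 = (((mr + 1).toNat : Nat) : Int) := by omega
  have hcolsN : mc + 1 = (((mc + 1).toNat : Nat) : Int) := by omega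
  simp only [expand_space, expand_space_alt, hmr, hmc, Option.getD_some]
  rw [hrowsN, hcolsN]
  apply PySem.List.foldl_congr_mem
  intro acc p hp
  have hp1 : 0 ≤ p.1 ∧ p.1 ≤ mr := ⟨(hnn p hp).1, hbr p hp⟩
  have hp2 : 0 ≤ p.2 ∧ p.2 ≤ mc := ⟨(hnn p hp).2, hbc p hp⟩
  have hcontains : space.contains (p.1, p.2) = true := by
    rw [List.contains_iff_mem]; simpa using hp
  have hmemR : p.2 ∈ rowPts space (((mc + 1).toNat : Nat) : Int) p.1 := by
    unfold rowPts
    rw [List.mem_filter, PySem.List.mem_pyRange_one]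
    exact ⟨⟨hp2.1, by omega⟩, hcontains⟩
  have hmemC : p.1 ∈ colPts space (((mr + 1).toNat : Nat) : Int) p.2 := by
    unfold colPts
    rw [List.mem_filter, PySem.List.mem_pyRange_one]
    exact ⟨⟨hp1.1, by omega⟩, hcontains⟩
  have hget1 := (loop1 space shift (((mc + 1).toNat : Nat) : Int) (mr + 1).toNat).2 p
  have hget2 := (loop2 space shift (((mr + 1).toNat : Nat) : Int) (mc + 1).toNat).2 p
  rw [if_pos ⟨hp1.1, by omega, hmemR⟩] at hget1
  rw [if_pos ⟨hp2.1, by omega, hmemC⟩] at hget2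
  have hgB1 := (loopB (PySem.Set.ofList (space.map (fun p => p.1))) shift (mr + 1).toNat).2 p.1
  have hgB2 := (loopB (PySem.Set.ofList (space.map (fun p => p.2))) shift (mc + 1).toNat).2 p.2
  rw [if_pos ⟨hp1.1, by omega⟩] at hgB1
  rw [if_pos ⟨hp2.1, by omega⟩] at hgB2
  rw [PySem.Dict.getD_of_get?_eq_some _ (0, 0) hget1,
      PySem.Dict.getD_of_get?_eq_some _ (0, 0) hget2,
      PySem.Dict.getD_of_get?_eq_some _ 0 hgB1,
      PySem.Dict.getD_of_get?_eq_some _ 0 hgB2]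
  have hcR : PySem.Set.contains (PySem.Set.ofList (space.map (fun p => p.1))) p.1 = true := by
    simp only [PySem.Set.contains, PySem.Set.mem_ofList, List.contains_iff_mem, decide_eq_true_eq]
    exact List.mem_map_of_mem hp
  have hcC : PySem.Set.contains (PySem.Set.ofList (space.map (fun p => p.2))) p.2 = true := by
    simp only [PySem.Set.contains, PySem.Set.mem_ofList, List.contains_iff_mem, decide_eq_true_eq]
    exact List.mem_map_of_mem hp
  rw [bCnt_succ_occupied _ _ hp1.1 hcR, bCnt_succ_occupied _ _ hp2.1 hcC,
      bCnt_eq_eRow space (((mc + 1).toNat : Nat) : Int) p.1 hnn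
        (fun q hq => by have := hbc q hq; omega),
      bCnt_eq_eCol space (((mr + 1).toNat : Nat) : Int) p.2 hnn
        (fun q hq => by have := hbr q hq; omega)]
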